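-- pv_equiv track=rewrite | github.com/Hybrid-SyntaX/Aspect-Extraction-CNN-IN-TF2 | DatasetReader.py | removeUnusedFeatures
-- ===== SOURCE A (Python) =====
-- def removeUnusedFeatures(x, x_pos_1hot, y):
--     new_sentences = []
--     new_sentence_poses = []
--     new_sentence_labels = []
--     for sentence, sentence_pos_1hot, sentence_label in zip(x, x_pos_1hot, y):
--         new_sentence = []
--         new_sentence_pos = []
--         new_sentence_label = []
--         for word, word_pos, word_Label in zip(sentence, sentence_pos_1hot, sentence_label):
--             if word_pos is not None:
--                 new_sentence.append(word)
--                 new_sentence_pos.append(word_pos)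
--                 new_sentence_label.append(word_Label)
--         new_sentences.append(new_sentence)
--         new_sentence_poses.append(new_sentence_pos)
--         new_sentence_labels.append(new_sentence_label)
--
--     return new_sentences, new_sentence_poses, new_sentence_labels
-- ===== SOURCE B (Python) =====
-- def _apply_mask(col, mask):
--     return [v for v, keep in zip(col, mask) if keep]
--
-- def removeUnusedFeatures(x, x_pos_1hot, y):
--     # Stage 1: a boolean keep-mask per sentence, derived from the POS column
--     # (zipped with the other two columns only to truncate to the shortest).
--     masks = [[p is not None for _, p, _l in zip(s, sp, l)]
--              for s, sp, l in zip(x, x_pos_1hot, y)]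
--     # Stage 2: three independent passes, each filtering one column by its mask.
--     new_sentences = [_apply_mask(s, m) for s, m in zip(x, masks)]
--     new_sentence_poses = [_apply_mask(sp, m) for sp, m in zip(x_pos_1hot, masks)]
--     new_sentence_labels = [_apply_mask(l, m) for l, m in zip(y, masks)]
--     return new_sentences, new_sentence_poses, new_sentence_labels
-- ===== Notes on version B (the rewrite author's own statement) =====
-- stated objective: alternative
-- what changed: B replaces A's single fused loop with three parallel accumulators by a staged mask-and-compress pipeline: it first materialises a boolean keep-mask per sentence from the POS column, then produces each of the three output columns in its own independent filtering pass over that mask.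
import Mathlib
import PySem

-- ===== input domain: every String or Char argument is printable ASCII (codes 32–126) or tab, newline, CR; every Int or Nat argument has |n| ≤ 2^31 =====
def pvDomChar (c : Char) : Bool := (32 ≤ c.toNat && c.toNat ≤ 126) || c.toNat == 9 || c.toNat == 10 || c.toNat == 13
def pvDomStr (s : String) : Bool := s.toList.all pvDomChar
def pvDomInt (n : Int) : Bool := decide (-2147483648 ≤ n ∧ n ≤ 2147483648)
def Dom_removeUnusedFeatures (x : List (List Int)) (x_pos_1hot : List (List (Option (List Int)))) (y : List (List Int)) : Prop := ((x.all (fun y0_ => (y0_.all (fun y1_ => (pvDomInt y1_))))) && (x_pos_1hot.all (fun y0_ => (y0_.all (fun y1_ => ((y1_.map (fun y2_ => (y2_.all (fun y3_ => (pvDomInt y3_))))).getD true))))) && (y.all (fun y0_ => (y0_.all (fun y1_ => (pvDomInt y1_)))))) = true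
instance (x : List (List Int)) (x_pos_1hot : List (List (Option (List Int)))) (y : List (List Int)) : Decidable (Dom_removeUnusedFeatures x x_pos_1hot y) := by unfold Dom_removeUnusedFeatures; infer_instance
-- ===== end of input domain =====

-- B replaces A's fused loop (three parallel appends) by a staged pipeline: a boolean
-- keep-mask per sentence computed from the POS column, then three independent
-- mask-filtering passes, one per output column (objective: alternative decomposition).


-- Python zip over three lists: truncates to the shortest.
def pyZip3 {α β γ : Type} : List α → List β → List γ → List (α × β × γ)
  | a :: as, b :: bs, c :: cs => (a, b, c) :: pyZip3 as bs cs
  | _, _, _ => []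

-- ===== PORT A =====
-- A: one fused loop; inside it three parallel appends guarded by `word_pos is not None`.
def removeUnusedFeatures (x : List (List Int)) (x_pos_1hot : List (List (Option (List Int)))) (y : List (List Int)) : List (List Int) × List (List (Option (List Int))) × List (List Int) :=
  (pyZip3 x x_pos_1hot y).foldl
    (fun outs row =>
      let inner := (pyZip3 row.1 row.2.1 row.2.2).foldl
        (fun acc t =>
          if t.2.1.isSome then
            (acc.1 ++ [t.1], acc.2.1 ++ [t.2.1], acc.2.2 ++ [t.2.2])
          else acc)
        ([], [], [])
      (outs.1 ++ [inner.1], outs.2.1 ++ [inner.2.1], outs.2.2 ++ [inner.2.2]))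
    ([], [], [])

-- ===== PORT B =====
-- B helper: `[v for v, keep in zip(col, mask) if keep]`
def applyMask {α : Type} (col : List α) (mask : List Bool) : List α :=
  ((col.zip mask).filter (fun p => p.2)).map (fun p => p.1)

-- B: stage 1 builds one boolean keep-mask per sentence from the POS column
-- (zipped with the other two columns only to truncate to the shortest);
-- stage 2 filters each of the three columns independently by its mask.
def removeUnusedFeatures_alt (x : List (List Int)) (x_pos_1hot : List (List (Option (List Int)))) (y : List (List Int)) : List (List Int) × List (List (Option (List Int))) × List (List Int) :=
  let masks := (pyZip3 x x_pos_1hot y).map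
    (fun row => (pyZip3 row.1 row.2.1 row.2.2).map (fun t => t.2.1.isSome))
  ((x.zip masks).map (fun sm => applyMask sm.1 sm.2),
   (x_pos_1hot.zip masks).map (fun sm => applyMask sm.1 sm.2),
   (y.zip masks).map (fun sm => applyMask sm.1 sm.2))

-- ===== PRECONDITION & SPEC =====
def Spec_removeUnusedFeatures (x : List (List Int)) (x_pos_1hot : List (List (Option (List Int)))) (y : List (List Int)) (out : List (List Int) × List (List (Option (List Int))) × List (List Int)) : Prop := out = removeUnusedFeatures_alt x x_pos_1hot y
instance (x : List (List Int)) (x_pos_1hot : List (List (Option (List Int)))) (y : List (List Int)) (out : List (List Int) × List (List (Option (List Int))) × List (List Int)) : Decidable (Spec_removeUnusedFeatures x x_pos_1hot y out) := by unfold Spec_removeUnusedFeatures; infer_instance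

-- ===== CLAIM (what is proved, stated in full; the proofs are below) =====
def Claim_equal_removeUnusedFeatures : Prop := ∀ (x : List (List Int)) (x_pos_1hot : List (List (Option (List Int)))) (y : List (List Int)), Dom_removeUnusedFeatures x x_pos_1hot y → Spec_removeUnusedFeatures x x_pos_1hot y (removeUnusedFeatures x x_pos_1hot y)

-- ===== LEMMAS AND PROOFS =====

-- A's inner fold equals filter-then-project, for any starting accumulator.
theorem inner_eq (ts : List (Int × Option (List Int) × Int))
    (a : List Int) (b : List (Option (List Int))) (c : List Int) :
    ts.foldl
      (fun acc t =>
        if t.2.1.isSome then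
          (acc.1 ++ [t.1], acc.2.1 ++ [t.2.1], acc.2.2 ++ [t.2.2])
        else acc)
      (a, b, c)
    = (a ++ (ts.filter (fun t => t.2.1.isSome)).map (·.1),
       b ++ (ts.filter (fun t => t.2.1.isSome)).map (·.2.1),
       c ++ (ts.filter (fun t => t.2.1.isSome)).map (·.2.2)) := by
  induction ts generalizing a b c with
  | nil => simp
  | cons t ts ih =>
    by_cases h : t.2.1.isSome <;> simp [h, ih]

-- the three per-sentence columns, A-style
def keptCol1 (row : List Int × List (Option (List Int)) × List Int) : List Int :=
  ((pyZip3 row.1 row.2.1 row.2.2).filter (fun t => t.2.1.isSome)).map (·.1)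
def keptCol2 (row : List Int × List (Option (List Int)) × List Int) : List (Option (List Int)) :=
  ((pyZip3 row.1 row.2.1 row.2.2).filter (fun t => t.2.1.isSome)).map (·.2.1)
def keptCol3 (row : List Int × List (Option (List Int)) × List Int) : List Int :=
  ((pyZip3 row.1 row.2.1 row.2.2).filter (fun t => t.2.1.isSome)).map (·.2.2)

-- A's outer fold, in closed form.
theorem a_outer (rows : List (List Int × List (Option (List Int)) × List Int))
    (a : List (List Int)) (b : List (List (Option (List Int)))) (c : List (List Int)) :
    rows.foldl
      (fun outs row =>
        let inner := (pyZip3 row.1 row.2.1 row.2.2).foldl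
          (fun acc t =>
            if t.2.1.isSome then
              (acc.1 ++ [t.1], acc.2.1 ++ [t.2.1], acc.2.2 ++ [t.2.2])
            else acc)
          ([], [], [])
        (outs.1 ++ [inner.1], outs.2.1 ++ [inner.2.1], outs.2.2 ++ [inner.2.2]))
      (a, b, c)
    = (a ++ rows.map keptCol1, b ++ rows.map keptCol2, c ++ rows.map keptCol3) := by
  induction rows generalizing a b c with
  | nil => simp
  | cons row rows ih =>
    simp only [List.foldl_cons, ih]
    simp [inner_eq, keptCol1, keptCol2, keptCol3]

-- the mask of one row, as B computes it
def rowMask (row : List Int × List (Option (List Int)) × List Int) : List Bool :=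
  (pyZip3 row.1 row.2.1 row.2.2).map (fun t => t.2.1.isSome)

-- applying the row mask to each column recovers the A-style kept columns
theorem applyMask_fst : ∀ (s : List Int) (sp : List (Option (List Int))) (l : List Int),
    applyMask s (rowMask (s, sp, l)) = keptCol1 (s, sp, l) := by
  intro s
  induction s with
  | nil => intro sp l; cases sp <;> cases l <;> simp [applyMask, rowMask, keptCol1, pyZip3]
  | cons a s ih =>
    intro sp l
    cases sp with
    | nil => simp [applyMask, rowMask, keptCol1, pyZip3]
    | cons b sp =>
      cases l with
      | nil => simp [applyMask, rowMask, keptCol1, pyZip3]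
      | cons c l =>
        have := ih sp l
        by_cases h : b.isSome <;>
          simp_all [applyMask, rowMask, keptCol1, pyZip3, h]

theorem applyMask_snd : ∀ (s : List Int) (sp : List (Option (List Int))) (l : List Int),
    applyMask sp (rowMask (s, sp, l)) = keptCol2 (s, sp, l) := by
  intro s
  induction s with
  | nil => intro sp l; cases sp <;> cases l <;> simp [applyMask, rowMask, keptCol2, pyZip3]
  | cons a s ih =>
    intro sp l
    cases sp with
    | nil => simp [applyMask, rowMask, keptCol2, pyZip3]
    | cons b sp =>
      cases l with
      | nil => simp [applyMask, rowMask, keptCol2, pyZip3]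
      | cons c l =>
        have := ih sp l
        by_cases h : b.isSome <;>
          simp_all [applyMask, rowMask, keptCol2, pyZip3, h]

theorem applyMask_thd : ∀ (s : List Int) (sp : List (Option (List Int))) (l : List Int),
    applyMask l (rowMask (s, sp, l)) = keptCol3 (s, sp, l) := by
  intro s
  induction s with
  | nil => intro sp l; cases sp <;> cases l <;> simp [applyMask, rowMask, keptCol3, pyZip3]
  | cons a s ih =>
    intro sp l
    cases sp with
    | nil => simp [applyMask, rowMask, keptCol3, pyZip3]
    | cons b sp =>
      cases l with
      | nil => simp [applyMask, rowMask, keptCol3, pyZip3]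
      | cons c l =>
        have := ih sp l
        by_cases h : b.isSome <;>
          simp_all [applyMask, rowMask, keptCol3, pyZip3, h]

-- zipping a column with the masks of the rows and filtering = mapping the kept column over the rows
theorem b_col1 : ∀ (x : List (List Int)) (xp : List (List (Option (List Int)))) (y : List (List Int)),
    (x.zip ((pyZip3 x xp y).map rowMask)).map (fun sm => applyMask sm.1 sm.2)
      = (pyZip3 x xp y).map keptCol1 := by
  intro x
  induction x with
  | nil => intro xp y; cases xp <;> cases y <;> simp [pyZip3]
  | cons s x ih =>
    intro xp y
    cases xp with
    | nil => simp [pyZip3]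
    | cons sp xp =>
      cases y with
      | nil => simp [pyZip3]
      | cons l y => simp [pyZip3, ih, applyMask_fst s sp l]

theorem b_col2 : ∀ (x : List (List Int)) (xp : List (List (Option (List Int)))) (y : List (List Int)),
    (xp.zip ((pyZip3 x xp y).map rowMask)).map (fun sm => applyMask sm.1 sm.2)
      = (pyZip3 x xp y).map keptCol2 := by
  intro x
  induction x with
  | nil => intro xp y; cases xp <;> cases y <;> simp [pyZip3]
  | cons s x ih =>
    intro xp y
    cases xp with
    | nil => simp [pyZip3]
    | cons sp xp =>
      cases y with
      | nil => simp [pyZip3]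
      | cons l y => simp [pyZip3, ih, applyMask_snd s sp l]

theorem b_col3 : ∀ (x : List (List Int)) (xp : List (List (Option (List Int)))) (y : List (List Int)),
    (y.zip ((pyZip3 x xp y).map rowMask)).map (fun sm => applyMask sm.1 sm.2)
      = (pyZip3 x xp y).map keptCol3 := by
  intro x
  induction x with
  | nil => intro xp y; cases xp <;> cases y <;> simp [pyZip3]
  | cons s x ih =>
    intro xp y
    cases xp with
    | nil => simp [pyZip3]
    | cons sp xp =>
      cases y with
      | nil => simp [pyZip3]
      | cons l y => simp [pyZip3, ih, applyMask_thd s sp l]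

-- ===== VERDICT (by name: the statement is the Claim_ definition above) =====
theorem removeUnusedFeatures_spec : Claim_equal_removeUnusedFeatures := by
  intro x xp y _
  show removeUnusedFeatures x xp y = removeUnusedFeatures_alt x xp y
  unfold removeUnusedFeatures removeUnusedFeatures_alt
  rw [a_outer]
  have hm : (fun (row : List Int × List (Option (List Int)) × List Int) =>
      (pyZip3 row.1 row.2.1 row.2.2).map (fun t => t.2.1.isSome)) = rowMask := rfl
  simp only [hm, b_col1, b_col2, b_col3]
  simp
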